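-- pv_equiv track=rewrite | github.com/MrCl0wnLab/string-x | src/stringx/core/validators.py | validate_domain_br
-- ===== SOURCE A (Python) =====
-- def validate_domain_br(domain: str) -> bool:
--     """
--     Validates Brazilian domain names (.br TLDs).
--
--     Args:
--         domain (str): The domain name to validate.
--
--     Returns:
--         bool: True if the domain ends with a valid Brazilian TLD, False otherwise.
--
--     Example:
--         >>> validate_domain_br("example.com.br")
--         >>> validate_domain_br("site.gov.br")
--     """
--     if not domain:
--         return False
--
--     # Lista de TLDs brasileiros comuns
--     br_tlds = [
--         'com.br', 'net.br', 'org.br', 'gov.br', 'edu.br',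
--         'mil.br', 'esp.br', 'leg.br', 'jus.br', 'mp.br',
--         'wiki.br', 'blog.br', 'adm.br', 'adv.br', 'arq.br',
--         'ato.br', 'bio.br', 'bmd.br', 'cim.br', 'cng.br',
--         'cnt.br', 'ecn.br', 'eng.br', 'eti.br', 'far.br',
--         'fnd.br', 'fot.br', 'fst.br', 'ggf.br', 'jor.br',
--         'lel.br', 'mat.br', 'med.br', 'mus.br', 'not.br',
--         'ntr.br', 'odo.br', 'ppg.br', 'pro.br', 'psc.br',
--         'qsl.br', 'radio.br', 'slg.br', 'trd.br', 'vet.br',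
--         'zlg.br', 'nom.br', 'agr.br', 'art.br', 'can.br',
--         'coop.br', 'def.br', 'emp.br', 'flog.br', 'imb.br',
--         'ind.br', 'inf.br', 'rec.br', 'srv.br', 'tmp.br',
--         'tur.br', 'tv.br', 'vlog.br'
--     ]
--
--     domain = domain.lower().strip()
--     return any(domain.endswith('.' + tld) for tld in br_tlds)
-- ===== SOURCE B (Python) =====
-- # Different algorithm: split the normalized domain at dots once and do a single
-- # set lookup of the joined last two labels, instead of 63 per-TLD endswith scans.
-- BR_TLDS = frozenset(
--     "com.br net.br org.br gov.br edu.br mil.br esp.br leg.br jus.br mp.br "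
--     "wiki.br blog.br adm.br adv.br arq.br ato.br bio.br bmd.br cim.br cng.br "
--     "cnt.br ecn.br eng.br eti.br far.br fnd.br fot.br fst.br ggf.br jor.br "
--     "lel.br mat.br med.br mus.br not.br ntr.br odo.br ppg.br pro.br psc.br "
--     "qsl.br radio.br slg.br trd.br vet.br zlg.br nom.br agr.br art.br can.br "
--     "coop.br def.br emp.br flog.br imb.br ind.br inf.br rec.br srv.br tmp.br "
--     "tur.br tv.br vlog.br".split()
-- )
--
--
-- def validate_domain_br(domain: str) -> bool:
--     if not domain:
--         return False
--     parts = domain.lower().strip().split('.')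
--     return len(parts) >= 3 and parts[-2] + '.' + parts[-1] in BR_TLDS
-- ===== Notes on version B (the rewrite author's own statement) =====
-- stated objective: idiomatic
-- what changed: Instead of scanning all 63 TLDs with a per-TLD endswith check, B splits the normalized domain at dots once and does a single set-membership lookup of the joined last two labels (the three-part minimum reproduces the required leading dot); the TLD set is built once from a single whitespace-separated string.
import Mathlib
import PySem

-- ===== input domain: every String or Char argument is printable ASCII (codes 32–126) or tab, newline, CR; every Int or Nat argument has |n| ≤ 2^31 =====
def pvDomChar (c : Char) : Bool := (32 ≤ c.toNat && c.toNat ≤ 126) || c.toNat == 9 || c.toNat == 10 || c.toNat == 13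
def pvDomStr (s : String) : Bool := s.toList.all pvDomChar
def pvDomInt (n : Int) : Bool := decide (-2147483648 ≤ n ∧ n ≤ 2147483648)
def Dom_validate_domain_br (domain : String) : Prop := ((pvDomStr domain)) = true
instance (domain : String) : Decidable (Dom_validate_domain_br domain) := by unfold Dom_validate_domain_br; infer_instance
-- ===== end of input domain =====

-- B replaces A's 63-fold endswith scan by one split at dots plus a single set
-- lookup of the last two labels (idiomatic rewrite; same return value).

-- ===== PORT A =====
def brTlds : List String :=
  ["com.br", "net.br", "org.br", "gov.br", "edu.br",
   "mil.br", "esp.br", "leg.br", "jus.br", "mp.br",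
   "wiki.br", "blog.br", "adm.br", "adv.br", "arq.br",
   "ato.br", "bio.br", "bmd.br", "cim.br", "cng.br",
   "cnt.br", "ecn.br", "eng.br", "eti.br", "far.br",
   "fnd.br", "fot.br", "fst.br", "ggf.br", "jor.br",
   "lel.br", "mat.br", "med.br", "mus.br", "not.br",
   "ntr.br", "odo.br", "ppg.br", "pro.br", "psc.br",
   "qsl.br", "radio.br", "slg.br", "trd.br", "vet.br",
   "zlg.br", "nom.br", "agr.br", "art.br", "can.br",
   "coop.br", "def.br", "emp.br", "flog.br", "imb.br",
   "ind.br", "inf.br", "rec.br", "srv.br", "tmp.br",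
   "tur.br", "tv.br", "vlog.br"]

def validate_domain_br (domain : String) : Bool :=
  if domain = "" then false
  else
    let d := PySem.Str.strip (PySem.Str.lower domain)
    brTlds.any (fun tld => PySem.Str.endswith d ("." ++ tld))

-- ===== PORT B =====
-- Source B builds BR_TLDS once from one whitespace-separated string via .split().
def brTldBlob : String :=
  "com.br net.br org.br gov.br edu.br mil.br esp.br leg.br jus.br mp.br wiki.br blog.br adm.br adv.br arq.br ato.br bio.br bmd.br cim.br cng.br cnt.br ecn.br eng.br eti.br far.br fnd.br fot.br fst.br ggf.br jor.br lel.br mat.br med.br mus.br not.br ntr.br odo.br ppg.br pro.br psc.br qsl.br radio.br slg.br trd.br vet.br zlg.br nom.br agr.br art.br can.br coop.br def.br emp.br flog.br imb.br ind.br inf.br rec.br srv.br tmp.br tur.br tv.br vlog.br"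

def brTldSet : PySem.Set (List Char) :=
  PySem.Set.ofList ((PySem.Str.split₀ brTldBlob).map String.toList)

def validate_domain_br_alt (domain : String) : Bool :=
  if domain = "" then false
  else
    let parts := PySem.Chars.splitOn (PySem.Chars.strip (PySem.Chars.lower domain.toList)) ['.']
    decide (3 ≤ parts.length) &&
      (match PySem.List.pyGet? parts (-2), PySem.List.pyGet? parts (-1) with
       | some a, some b => PySem.Set.contains brTldSet (a ++ '.' :: b)
       | _, _ => false)

-- ===== PRECONDITION & SPEC =====
def Spec_validate_domain_br (domain : String) (out : Bool) : Prop := out = validate_domain_br_alt domain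
instance (domain : String) (out : Bool) : Decidable (Spec_validate_domain_br domain out) := by unfold Spec_validate_domain_br; infer_instance

-- ===== CLAIM (what is proved, stated in full; the proofs are below) =====
def Claim_equal_validate_domain_br : Prop := ∀ (domain : String), Dom_validate_domain_br domain → Spec_validate_domain_br domain (validate_domain_br domain)

-- ===== LEMMAS AND PROOFS =====

-- B's runtime-split set equals A's list, read as a set of char lists.
set_option maxRecDepth 16384 in
set_option maxHeartbeats 2000000 in
lemma brTldSet_eq : brTldSet = PySem.Set.ofList (brTlds.map String.toList) := by decide

-- Reference single-character split used only in the proofs.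
def mySplit : List Char → List (List Char)
  | [] => [[]]
  | c :: rest =>
      if c = '.' then [] :: mySplit rest
      else (c :: (mySplit rest).headI) :: (mySplit rest).tail

lemma mySplit_ne_nil (cs : List Char) : mySplit cs ≠ [] := by
  cases cs with
  | nil => simp [mySplit]
  | cons c rest => simp only [mySplit]; split <;> simp

lemma go_spec : ∀ (fuel : Nat) (l cur : List Char) (acc : List (List Char)),
    l.length ≤ fuel →
    PySem.Chars.splitOn.go ['.'] fuel l cur acc
      = acc.reverse ++ (mySplit l).modifyHead (fun x => cur.reverse ++ x) := by
  intro fuel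
  induction fuel with
  | zero =>
    intro l cur acc h
    have hl : l = [] := List.eq_nil_of_length_eq_zero (Nat.le_zero.mp h)
    subst hl
    simp [PySem.Chars.splitOn.go, mySplit]
  | succ n ih =>
    intro l cur acc h
    cases l with
    | nil => simp [PySem.Chars.splitOn.go, mySplit]
    | cons c rest =>
      obtain ⟨hh, tt, hrest⟩ : ∃ hh tt, mySplit rest = hh :: tt := by
        cases h' : mySplit rest with
        | nil => exact absurd h' (mySplit_ne_nil rest)
        | cons x y => exact ⟨x, y, rfl⟩
      by_cases hc : c = '.'
      · subst hc
        have hstep : PySem.Chars.splitOn.go ['.'] (n+1) ('.' :: rest) cur acc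
            = PySem.Chars.splitOn.go ['.'] n rest [] (cur.reverse :: acc) := by
          simp [PySem.Chars.splitOn.go, List.isPrefixOf]
        rw [hstep, ih rest [] (cur.reverse :: acc) (by simpa using Nat.le_of_succ_le_succ h)]
        simp [mySplit, hrest]
      · have hstep : PySem.Chars.splitOn.go ['.'] (n+1) (c :: rest) cur acc
            = PySem.Chars.splitOn.go ['.'] n rest (c :: cur) acc := by
          simp only [PySem.Chars.splitOn.go, List.isPrefixOf, Bool.and_true]
          split
          · next h' =>
              have hcc : ('.' : Char) = c := by simpa using h'
              exact absurd hcc.symm hc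
          · rfl
        rw [hstep, ih rest (c :: cur) acc (by simpa using Nat.le_of_succ_le_succ h)]
        simp [mySplit, hc, hrest]


lemma splitOn_eq_mySplit (cs : List Char) :
    PySem.Chars.splitOn cs ['.'] = mySplit cs := by
  obtain ⟨hh, tt, hrest⟩ : ∃ hh tt, mySplit cs = hh :: tt := by
    cases h' : mySplit cs with
    | nil => exact absurd h' (mySplit_ne_nil cs)
    | cons x y => exact ⟨x, y, rfl⟩
  show PySem.Chars.splitOn.go ['.'] (cs.length + 1) cs [] [] = mySplit cs
  rw [go_spec (cs.length + 1) cs [] [] (by omega)]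
  simp [hrest]


lemma join_mySplit (cs : List Char) :
    PySem.Chars.join ['.'] (mySplit cs) = cs := by
  induction cs with
  | nil => simp [mySplit, PySem.Chars.join_singleton]
  | cons c rest ih =>
    obtain ⟨hh, tt, hrest⟩ : ∃ hh tt, mySplit rest = hh :: tt := by
      cases h' : mySplit rest with
      | nil => exact absurd h' (mySplit_ne_nil rest)
      | cons x y => exact ⟨x, y, rfl⟩
    by_cases hc : c = '.'
    · subst hc
      rw [show mySplit ('.' :: rest) = [] :: mySplit rest by simp [mySplit]]
      rw [hrest] at ih ⊢
      rw [PySem.Chars.join_cons_cons]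
      simp [ih]
    · rw [show mySplit (c :: rest) = (c :: hh) :: tt by simp [mySplit, hc, hrest]]
      rw [hrest] at ih
      cases tt with
      | nil =>
        rw [PySem.Chars.join_singleton]
        rw [PySem.Chars.join_singleton] at ih
        simp [ih]
      | cons y tt' =>
        rw [PySem.Chars.join_cons_cons]
        rw [PySem.Chars.join_cons_cons] at ih
        simp only [← ih, List.cons_append, List.append_assoc]


lemma mySplit_append (b a : List Char) :
    mySplit (b ++ '.' :: a) = mySplit b ++ mySplit a := by
  induction b with
  | nil => simp [mySplit]
  | cons c b' ih =>
    obtain ⟨hh, tt, hrest⟩ : ∃ hh tt, mySplit b' = hh :: tt := by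
      cases h' : mySplit b' with
      | nil => exact absurd h' (mySplit_ne_nil b')
      | cons x y => exact ⟨x, y, rfl⟩
    by_cases hc : c = '.'
    · subst hc; simp [mySplit, ih]
    · simp [mySplit, hc, ih, hrest]


lemma join_append_two (init : List (List Char)) (hne : init ≠ []) (a b : List Char) :
    PySem.Chars.join ['.'] (init ++ [a, b])
      = PySem.Chars.join ['.'] init ++ '.' :: (a ++ '.' :: b) := by
  induction init with
  | nil => exact absurd rfl hne
  | cons x i' ih =>
    cases i' with
    | nil =>
      simp [PySem.Chars.join_cons_cons, PySem.Chars.join_singleton]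
    | cons y i'' =>
      have hrec := ih (by simp)
      simp only [List.cons_append, PySem.Chars.join_cons_cons] at hrec ⊢
      rw [hrec]
      simp [List.append_assoc]


lemma brTlds_split_len : ∀ t ∈ brTlds, (mySplit t.toList).length = 2 := by decide

lemma exists_decomp {α : Type} (xs : List α) (h : 2 ≤ xs.length) :
    ∃ init a b, xs = init ++ [a, b] := by
  cases hr : xs.reverse with
  | nil =>
    rw [List.reverse_eq_nil_iff] at hr
    subst hr; simp at h
  | cons b t =>
    cases t with
    | nil =>
      have : xs = [b] := by
        have := congrArg List.reverse hr
        simpa using this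
      subst this; simp at h
    | cons a t' =>
      refine ⟨t'.reverse, a, b, ?_⟩
      have := congrArg List.reverse hr
      simpa using this


lemma pyGet_neg2 {α : Type} (init : List α) (a b : α) :
    PySem.List.pyGet? (init ++ [a, b]) (-2) = some a := by
  simp [PySem.List.pyGet?, PySem.List.pyIdx?]


lemma pyGet_neg1 {α : Type} (init : List α) (a b : α) :
    PySem.List.pyGet? (init ++ [a, b]) (-1) = some b := by
  simp [PySem.List.pyGet?, PySem.List.pyIdx?]


lemma key_iff (cs : List Char) :
    (∃ t ∈ brTlds, ('.' :: t.toList) <:+ cs) ↔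
    (∃ init a b, mySplit cs = init ++ [a, b] ∧ init ≠ [] ∧
      ∃ t ∈ brTlds, a ++ '.' :: b = t.toList) := by
  constructor
  · rintro ⟨t, ht, p, hp⟩
    have hlen := brTlds_split_len t ht
    obtain ⟨x, y, hxy⟩ : ∃ x y, mySplit t.toList = [x, y] := by
      match h' : mySplit t.toList, hlen with
      | [x, y], _ => exact ⟨x, y, rfl⟩
    refine ⟨mySplit p, x, y, ?_, mySplit_ne_nil p, t, ht, ?_⟩
    · rw [← hp, mySplit_append, hxy]
    · have hj := join_mySplit t.toList
      rw [hxy] at hj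
      rw [PySem.Chars.join_cons_cons, PySem.Chars.join_singleton] at hj
      simpa using hj
  · rintro ⟨init, a, b, hd, hne, t, ht, hab⟩
    refine ⟨t, ht, PySem.Chars.join ['.'] init, ?_⟩
    have := join_mySplit cs
    rw [hd, join_append_two init hne a b] at this
    rw [← hab]
    simpa using this


lemma main_eq (cs : List Char) :
    (brTlds.any fun tld => PySem.Chars.endswith cs ('.' :: tld.toList)) =
    ((decide (3 ≤ (mySplit cs).length)) &&
      (match PySem.List.pyGet? (mySplit cs) (-2), PySem.List.pyGet? (mySplit cs) (-1) with
       | some a, some b => PySem.Set.contains brTldSet (a ++ '.' :: b)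
       | _, _ => false)) := by
  have hiff :
      ((brTlds.any fun tld => PySem.Chars.endswith cs ('.' :: tld.toList)) = true) ↔
      (((decide (3 ≤ (mySplit cs).length)) &&
        (match PySem.List.pyGet? (mySplit cs) (-2), PySem.List.pyGet? (mySplit cs) (-1) with
         | some a, some b => PySem.Set.contains brTldSet (a ++ '.' :: b)
         | _, _ => false)) = true) := by
    rw [List.any_eq_true]
    constructor
    · intro ⟨t, ht, hend⟩
      have hsuf := (PySem.Chars.endswith_iff _ _).mp hend
      obtain ⟨init, a, b, hd, hne, t', ht', hab⟩ := (key_iff cs).mp ⟨t, ht, hsuf⟩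
      rw [hd, pyGet_neg2, pyGet_neg1]
      have hmem : (a ++ '.' :: b) ∈ brTldSet := by
        rw [brTldSet_eq, PySem.Set.mem_ofList]
        exact List.mem_map.mpr ⟨t', ht', hab.symm⟩
      have hc : PySem.Set.contains brTldSet (a ++ '.' :: b) = true :=
        (PySem.Set.contains_iff _ _).mpr hmem
      simp only [hc, Bool.and_eq_true, decide_eq_true_eq]
      refine ⟨?_, trivial⟩
      have hil : init.length ≠ 0 := fun h0 => hne (List.eq_nil_of_length_eq_zero h0)
      simp only [List.length_append, List.length_cons, List.length_nil]
      omega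
    · intro h
      rw [Bool.and_eq_true] at h
      obtain ⟨h1, h2⟩ := h
      have hlen : 3 ≤ (mySplit cs).length := of_decide_eq_true h1
      obtain ⟨init, a, b, hd⟩ := exists_decomp (mySplit cs) (by omega)
      rw [hd, pyGet_neg2, pyGet_neg1] at h2
      have hmem := (PySem.Set.contains_iff _ _).mp h2
      rw [brTldSet_eq, PySem.Set.mem_ofList] at hmem
      obtain ⟨t, ht, hteq⟩ := List.mem_map.mp hmem
      have hne : init ≠ [] := by
        intro h0; subst h0; simp [hd] at hlen
      obtain ⟨t0, ht0, hsuf⟩ := (key_iff cs).mpr ⟨init, a, b, hd, hne, t, ht, hteq.symm⟩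
      exact ⟨t0, ht0, (PySem.Chars.endswith_iff _ _).mpr hsuf⟩
  exact Bool.coe_iff_coe.mp hiff


-- ===== VERDICT (by name: the statement is the Claim_ definition above) =====
theorem validate_domain_br_spec : Claim_equal_validate_domain_br := by
  intro domain _
  unfold Spec_validate_domain_br validate_domain_br validate_domain_br_alt
  by_cases hd : domain = ""
  · simp [hd]
  · simp only [if_neg hd, splitOn_eq_mySplit]
    have hA : ∀ tld : String,
        PySem.Str.endswith (PySem.Str.strip (PySem.Str.lower domain)) ("." ++ tld)
          = PySem.Chars.endswith (PySem.Chars.strip (PySem.Chars.lower domain.toList)) ('.' :: tld.toList) := by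
      intro tld
      simp [PySem.Str.endswith_eq]
    simp only [hA]
    exact main_eq _
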